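-- pv_equiv track=rewrite | github.com/alan-smith-vt/Physarum | PCO/pco_format.py | grid_coords_to_node_id
-- ===== SOURCE A (Python) =====
-- def grid_coords_to_node_id(x, y, z, level):
--     """Convert grid coordinates to node ID"""
--     node_id = 'r'
--     for depth in range(level):
--         bit_pos = level - 1 - depth
--         octant = 0
--         if x & (1 << bit_pos): octant += 1
--         if y & (1 << bit_pos): octant += 2
--         if z & (1 << bit_pos): octant += 4
--         node_id += str(octant)
--     return node_id
-- ===== SOURCE B (Python) =====
-- def grid_coords_to_node_id(x, y, z, level):
--     """Convert grid coordinates to node ID"""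
--     n = 0
--     for bit in range(level):
--         octant = ((x >> bit) & 1) + 2 * ((y >> bit) & 1) + 4 * ((z >> bit) & 1)
--         n += octant << (3 * bit)
--     digits = ''
--     for _ in range(level):
--         digits = str(n & 7) + digits
--         n >>= 3
--     return 'r' + digits
-- ===== Notes on version B (the rewrite author's own statement) =====
-- stated objective: alternative
-- what changed: Instead of testing power-of-two masks and appending a digit string per depth, B packs all octants into a single Morton-code integer LSB-first and then renders it as level fixed-width base-8 digits in a separate peel-3-bits loop.
import Mathlib
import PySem

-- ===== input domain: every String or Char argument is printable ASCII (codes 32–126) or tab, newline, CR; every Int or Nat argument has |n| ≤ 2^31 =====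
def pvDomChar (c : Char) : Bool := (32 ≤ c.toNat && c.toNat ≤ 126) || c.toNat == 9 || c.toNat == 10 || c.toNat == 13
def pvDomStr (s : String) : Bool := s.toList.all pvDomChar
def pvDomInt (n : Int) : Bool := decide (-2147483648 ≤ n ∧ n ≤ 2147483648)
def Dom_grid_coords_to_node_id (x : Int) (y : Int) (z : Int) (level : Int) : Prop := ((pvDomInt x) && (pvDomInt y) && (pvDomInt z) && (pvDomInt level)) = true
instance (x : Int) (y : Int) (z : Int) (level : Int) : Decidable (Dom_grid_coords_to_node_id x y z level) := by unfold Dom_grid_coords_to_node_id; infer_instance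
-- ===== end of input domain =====

-- B packs one Morton-code integer and then renders it as base-8 digits in a separate peel loop,
-- instead of A's per-depth mask tests with string appends (alternative algorithm, same cost).


-- ===== PORT A =====
-- `1 << bit_pos`: bit_pos ≥ 0 for every depth in range(level), so `.toNat` is exact here;
-- `x & m` is PySem.Int.band (Python-exact on negatives); int truthiness is `≠ 0`.
def grid_coords_to_node_id (x : Int) (y : Int) (z : Int) (level : Int) : String :=
  (PySem.List.pyRange 0 level 1).foldl (fun node_id depth =>
    let bit_pos : Int := level - 1 - depth
    let mask : Int := (1 : Int) <<< bit_pos.toNat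
    let octant : Int := 0
    let octant := if PySem.Int.band x mask ≠ 0 then octant + 1 else octant
    let octant := if PySem.Int.band y mask ≠ 0 then octant + 2 else octant
    let octant := if PySem.Int.band z mask ≠ 0 then octant + 4 else octant
    node_id ++ PySem.Int.toStr octant) "r"

-- ===== PORT B =====
-- port of Source B: the first loop packs the Morton integer n (the shift counts `bit` and `3*bit`
-- are ≥ 0 for bit in range(level), so `.toNat` is exact); the second loop peels 3 bits at a
-- time, prepending each octal digit.  Shifts `>>>`/`<<<` are Python-exact for these counts.
def grid_coords_to_node_id_alt (x : Int) (y : Int) (z : Int) (level : Int) : String :=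
  let n : Int := (PySem.List.pyRange 0 level 1).foldl (fun n bit =>
    let b : Nat := bit.toNat
    let octant : Int := PySem.Int.band (x >>> b) 1 + 2 * PySem.Int.band (y >>> b) 1
        + 4 * PySem.Int.band (z >>> b) 1
    n + (octant <<< (3 * b))) 0
  let p : String × Int := (PySem.List.pyRange 0 level 1).foldl (fun p _ =>
    (PySem.Int.toStr (PySem.Int.band p.2 7) ++ p.1, p.2 >>> (3:Nat))) ("", n)
  "r" ++ p.1

-- ===== PRECONDITION & SPEC =====
def Spec_grid_coords_to_node_id (x : Int) (y : Int) (z : Int) (level : Int) (out : String) : Prop := out = grid_coords_to_node_id_alt x y z level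
instance (x : Int) (y : Int) (z : Int) (level : Int) (out : String) : Decidable (Spec_grid_coords_to_node_id x y z level out) := by unfold Spec_grid_coords_to_node_id; infer_instance

-- ===== CLAIM (what is proved, stated in full; the proofs are below) =====
def Claim_equal_grid_coords_to_node_id : Prop := ∀ (x : Int) (y : Int) (z : Int) (level : Int), Dom_grid_coords_to_node_id x y z level → Spec_grid_coords_to_node_id x y z level (grid_coords_to_node_id x y z level)

-- ===== LEMMAS AND PROOFS =====

-- Python bit b of x (0 or 1), combined into the octal digit b of the Morton code of (x,y,z)
def octd (x y z : Int) (b : Nat) : Int :=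
  PySem.Int.mod (x >>> b) 2 + 2 * PySem.Int.mod (y >>> b) 2 + 4 * PySem.Int.mod (z >>> b) 2

-- concatenation of str(f 0), …, str(f (K-1)), left to right
def catf (f : Nat → Int) : Nat → String
  | 0 => ""
  | K + 1 => catf f K ++ PySem.Int.toStr (f K)

-- what B's second loop builds from n in K iterations
def peel : Int → Nat → String
  | _, 0 => ""
  | n, K + 1 => peel (n >>> (3:Nat)) K ++ PySem.Int.toStr (PySem.Int.band n 7)

-- what B's first loop computes: Σ_{b<K} f b · 8^b
def sum8 (f : Nat → Int) : Nat → Int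
  | 0 => 0
  | K + 1 => sum8 f K + f K * 8 ^ K

-- Python `x & (1 << b)` is truthy iff Python `(x >> b) & 1` is 1 (exact on negatives)
theorem bit01 (x : Int) (b : Nat) :
    (PySem.Int.band x ((1 : Int) <<< b) ≠ 0) ↔ PySem.Int.mod (x >>> b) 2 = 1 := by
  have hmask : ((1 : Int) <<< b) = ((2 ^ b : Nat) : Int) := by
    rw [Int.shiftLeft_eq]; push_cast; ring
  rw [hmask, PySem.Int.mod_eq_emod_of_pos (by norm_num), Int.shiftRight_eq_div_pow]
  rcases le_or_gt 0 x with hx | hx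
  · obtain ⟨m, rfl⟩ : ∃ m : Nat, x = (m : Int) := ⟨x.toNat, by omega⟩
    rw [PySem.Int.band_of_nonneg hx (by positivity)]
    have hdiv : ((m : Int) / ((2 ^ b : Nat) : Int)) % 2 = ((m / 2 ^ b % 2 : Nat) : Int) := by
      push_cast; rfl
    rw [Int.toNat_natCast, Int.toNat_natCast, Nat.and_two_pow,
      Nat.testBit_eq_decide_div_mod_eq, hdiv]
    have hr : ((m / 2 ^ b % 2 : Nat) : Int) = 1 ↔ m / 2 ^ b % 2 = 1 := by omega
    rw [hr]
    by_cases h : m / 2 ^ b % 2 = 1 <;> simp [h]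
  · obtain ⟨m, rfl⟩ : ∃ m : Nat, x = -((m : Int)) - 1 := ⟨(-x - 1).toNat, by omega⟩
    have hq : (-((m : Int)) - 1) / ((2 ^ b : Nat) : Int) = -((m / 2 ^ b : Nat) : Int) - 1 := by
      have hp : (0:Int) < ((2 ^ b : Nat) : Int) := by positivity
      have hdm : (2 ^ b) * (m / 2 ^ b) + m % 2 ^ b = m := Nat.div_add_mod m (2 ^ b)
      have hrlt : m % 2 ^ b < 2 ^ b := Nat.mod_lt _ (by positivity)
      have huniq := (Int.ediv_emod_unique (a := -((m : Int)) - 1)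
        (b := ((2 ^ b : Nat) : Int)) (q := -((m / 2 ^ b : Nat) : Int) - 1)
        (r := ((2 ^ b - 1 - m % 2 ^ b : Nat) : Int)) hp)
      refine (huniq.mpr ⟨?_, by positivity, by exact_mod_cast Nat.sub_lt_of_lt (by omega)⟩).1
      have h1 : ((2 ^ b - 1 - m % 2 ^ b : Nat) : Int)
          = ((2 ^ b : Nat) : Int) - 1 - ((m % 2 ^ b : Nat) : Int) := by omega
      have h2 : ((2 ^ b : Nat) : Int) * ((m / 2 ^ b : Nat) : Int) + ((m % 2 ^ b : Nat) : Int)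
          = (m : Int) := by exact_mod_cast hdm
      rw [h1]
      linear_combination -h2
    have hband : PySem.Int.band (-((m : Int)) - 1) ((2 ^ b : Nat) : Int)
        = ((2 ^ b - (2 ^ b &&& m) : Nat) : Int) := by
      unfold PySem.Int.band
      rw [if_neg (by omega), if_pos (by positivity)]
      congr 1
      have hmm : (-(-((m : Int)) - 1) - 1).toNat = m := by omega
      rw [hmm, Int.toNat_natCast]
    rw [hband, hq, Nat.land_comm, Nat.and_two_pow, Nat.testBit_eq_decide_div_mod_eq]
    have hr : (-((m / 2 ^ b : Nat) : Int) - 1) % 2 = 1 ↔ ¬ (m / 2 ^ b % 2 = 1) := by omega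
    rw [hr]
    by_cases h : m / 2 ^ b % 2 = 1 <;> simp [h]

theorem octd_nonneg (x y z : Int) (b : Nat) : 0 ≤ octd x y z b ∧ octd x y z b < 8 := by
  unfold octd
  rcases PySem.Int.mod_two_eq (x >>> b) with h1 | h1 <;>
  rcases PySem.Int.mod_two_eq (y >>> b) with h2 | h2 <;>
  rcases PySem.Int.mod_two_eq (z >>> b) with h3 | h3 <;> rw [h1, h2, h3] <;> norm_num

theorem sum8_nonneg (f : Nat → Int) (h : ∀ b, 0 ≤ f b) (K : Nat) : 0 ≤ sum8 f K := by
  induction K with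
  | zero => simp [sum8]
  | succ K ih =>
    have h1 := h K
    have h2 : (0:Int) ≤ f K * 8 ^ K := by positivity
    simp only [sum8]; omega

theorem sum8_shift (f : Nat → Int) (K : Nat) :
    sum8 f (K + 1) = f 0 + 8 * sum8 (fun b => f (b + 1)) K := by
  induction K with
  | zero => simp [sum8]
  | succ K ih => rw [show K+1+1 = (K+1)+1 from rfl, sum8, ih, sum8]; ring

theorem band7_eq (f0 m : Int) (h0 : 0 ≤ f0) (h8 : f0 < 8) (hm : 0 ≤ m) :
    PySem.Int.band (f0 + 8 * m) 7 = f0 := by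
  rw [PySem.Int.band_of_nonneg (by omega) (by norm_num)]
  have ht : (f0 + 8 * m).toNat = f0.toNat + 8 * m.toNat := by omega
  have h7 : ((7:Int)).toNat = 2 ^ 3 - 1 := by decide
  rw [ht, h7, Nat.and_two_pow_sub_one_eq_mod]
  omega

theorem shift3_eq (f0 m : Int) (h0 : 0 ≤ f0) (h8 : f0 < 8) :
    (f0 + 8 * m) >>> (3:Nat) = m := by
  rw [Int.shiftRight_eq_div_pow]
  norm_num
  omega

theorem catf_congr (f g : Nat → Int) (K : Nat) (h : ∀ k < K, f k = g k) :
    catf f K = catf g K := by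
  induction K with
  | zero => rfl
  | succ K ih => rw [catf, catf, ih (fun k hk => h k (by omega)), h K (by omega)]

-- peeling the packed integer back, 3 bits at a time, recovers the digits, most significant first
theorem peel_sum8 (K : Nat) (f : Nat → Int) (h : ∀ b, 0 ≤ f b ∧ f b < 8) :
    peel (sum8 f K) K = catf (fun k => f (K - 1 - k)) K := by
  induction K generalizing f with
  | zero => rfl
  | succ K ih =>
    rw [peel, sum8_shift]
    have h0 := h 0
    have hm : 0 ≤ sum8 (fun b => f (b + 1)) K := sum8_nonneg _ (fun b => (h (b+1)).1) K
    rw [band7_eq (f 0) _ h0.1 h0.2 hm, shift3_eq (f 0) _ h0.1 h0.2,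
      ih (fun b => f (b + 1)) (fun b => h (b+1)), catf]
    have e1 : f (K + 1 - 1 - K) = f 0 := by norm_num
    rw [e1]
    congr 1
    exact catf_congr _ _ K (fun k hk => by congr 1; omega)

-- A's octant if-chain at depth K computes the octal digit (level-1-K) of the Morton code
theorem digitA (x y z level : Int) (K : Nat) (hk : (K : Int) < level) :
    (if PySem.Int.band z ((1:Int) <<< (level - 1 - ((K:Int))).toNat) ≠ 0 then
      (if PySem.Int.band y ((1:Int) <<< (level - 1 - ((K:Int))).toNat) ≠ 0 then
        (if PySem.Int.band x ((1:Int) <<< (level - 1 - ((K:Int))).toNat) ≠ 0 then (0:Int) + 1 else 0) + 2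
       else (if PySem.Int.band x ((1:Int) <<< (level - 1 - ((K:Int))).toNat) ≠ 0 then (0:Int) + 1 else 0)) + 4
     else
      (if PySem.Int.band y ((1:Int) <<< (level - 1 - ((K:Int))).toNat) ≠ 0 then
        (if PySem.Int.band x ((1:Int) <<< (level - 1 - ((K:Int))).toNat) ≠ 0 then (0:Int) + 1 else 0) + 2
       else (if PySem.Int.band x ((1:Int) <<< (level - 1 - ((K:Int))).toNat) ≠ 0 then (0:Int) + 1 else 0)))
    = octd x y z (level.toNat - 1 - K) := by
  have hb : (level - 1 - ((K:Int))).toNat = level.toNat - 1 - K := by omega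
  rw [hb]
  simp only [bit01, octd]
  rcases PySem.Int.mod_two_eq (x >>> (level.toNat - 1 - K)) with h1 | h1 <;>
  rcases PySem.Int.mod_two_eq (y >>> (level.toNat - 1 - K)) with h2 | h2 <;>
  rcases PySem.Int.mod_two_eq (z >>> (level.toNat - 1 - K)) with h3 | h3 <;>
    rw [h1, h2, h3] <;> norm_num

theorem foldA (x y z level : Int) :
    grid_coords_to_node_id x y z level
      = "r" ++ catf (fun k => octd x y z (level.toNat - 1 - k)) level.toNat := by
  unfold grid_coords_to_node_id
  have hlist : PySem.List.pyRange 0 level 1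
      = (List.range level.toNat).map (fun k : Nat => ((k : Int))) := by
    rw [PySem.List.pyRange_one]; simp
  rw [hlist]
  suffices h : ∀ K, K ≤ level.toNat →
      ((List.range K).map (fun k : Nat => ((k:Int)))).foldl (fun node_id depth =>
        let bit_pos : Int := level - 1 - depth
        let mask : Int := (1 : Int) <<< bit_pos.toNat
        let octant : Int := 0
        let octant := if PySem.Int.band x mask ≠ 0 then octant + 1 else octant
        let octant := if PySem.Int.band y mask ≠ 0 then octant + 2 else octant
        let octant := if PySem.Int.band z mask ≠ 0 then octant + 4 else octant
        node_id ++ PySem.Int.toStr octant) "r"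
      = "r" ++ catf (fun k => octd x y z (level.toNat - 1 - k)) K by
    exact h level.toNat le_rfl
  intro K
  induction K with
  | zero => intro _; simp [catf]
  | succ K ih =>
    intro hK
    rw [List.range_succ, List.map_append, List.foldl_append, ih (by omega)]
    simp only [List.map_cons, List.map_nil, List.foldl_cons, List.foldl_nil]
    rw [catf, ← String.append_assoc]
    congr 1
    rw [digitA x y z level K (by omega)]

theorem foldP (l : List Int) (s : String) (m : Int) :
    (l.foldl (fun p _ => (PySem.Int.toStr (PySem.Int.band p.2 7) ++ p.1, p.2 >>> (3:Nat))) (s, m)).1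
      = peel m l.length ++ s := by
  induction l generalizing s m with
  | nil => simp [peel]
  | cons a l ih =>
    rw [List.foldl_cons, ih, List.length_cons, peel, String.append_assoc]

theorem foldN (x y z level : Int) :
    ((List.range level.toNat).map (fun k : Nat => ((k : Int)))).foldl (fun n bit =>
      let b : Nat := bit.toNat
      let octant : Int := PySem.Int.band (x >>> b) 1 + 2 * PySem.Int.band (y >>> b) 1
          + 4 * PySem.Int.band (z >>> b) 1
      n + (octant <<< (3 * b))) 0
    = sum8 (octd x y z) level.toNat := by
  induction level.toNat with
  | zero => simp [sum8]
  | succ K ih =>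
    rw [List.range_succ, List.map_append, List.foldl_append, ih]
    simp only [List.map_cons, List.map_nil, List.foldl_cons, List.foldl_nil, Int.toNat_natCast]
    rw [sum8]
    congr 1
    rw [Int.shiftLeft_eq, pow_mul]
    rw [PySem.Int.band_one, PySem.Int.band_one, PySem.Int.band_one]
    norm_num [octd]

theorem foldB (x y z level : Int) :
    grid_coords_to_node_id_alt x y z level
      = "r" ++ peel (sum8 (octd x y z) level.toNat) level.toNat := by
  unfold grid_coords_to_node_id_alt
  have hlist : PySem.List.pyRange 0 level 1
      = (List.range level.toNat).map (fun k : Nat => ((k : Int))) := by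
    rw [PySem.List.pyRange_one]; simp
  rw [hlist, foldN]
  show "r" ++ (List.foldl (fun p _ => (PySem.Int.toStr (PySem.Int.band p.2 7) ++ p.1, p.2 >>> (3:Nat)))
      ("", sum8 (octd x y z) level.toNat)
      (List.map (fun k : Nat => ((k:Int))) (List.range level.toNat))).1
    = "r" ++ peel (sum8 (octd x y z) level.toNat) level.toNat
  rw [foldP]
  simp

-- ===== VERDICT (by name: the statement is the Claim_ definition above) =====
theorem grid_coords_to_node_id_spec : Claim_equal_grid_coords_to_node_id := by
  intro x y z level _
  unfold Spec_grid_coords_to_node_id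
  rw [foldA, foldB, peel_sum8 level.toNat (octd x y z) (octd_nonneg x y z)]
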